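-- pv_equiv track=rewrite | github.com/pkepley/aoc | 2019/aoc_day_10.py | visible_asteroids
-- ===== SOURCE A (Python) =====
-- from math import gcd, atan2, pi
--
-- def visible_asteroids(asteroids, pos):
--     # Don't want to consider pos in what follows
--     asteroids = [a for a in asteroids if a != pos]
--
--     # Get the raw directions from each asteroid to pos
--     directions = [(a[0] - pos[0], a[1] - pos[1]) for a in asteroids]
--
--     # Convert the raw directions (d_raw) into re-scaled direction
--     # (d_scl) and extract number of re-scaled steps from pos (d_gcd)
--     # save result as d_gcd, d
--     offset_data = []
--     for d_raw, a in zip(directions, asteroids):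
--         d_gcd = gcd(d_raw[0], d_raw[1])
--         d_scl = (int(d_raw[0] / d_gcd), int(d_raw[1] / d_gcd))
--         offset_data.append((d_scl, d_gcd, a))
--
--     # Sort by scaled direction and number of re-scaled steps retain
--     # all distinct directions which achieve smallest number of
--     # re-scaled steps
--     offset_data.sort()
--     visible_asteroids = []
--     curr_d = None
--     for i in range(len(offset_data)):
--         d_scl, d_gcd, a = offset_data[i]
--         if d_scl != curr_d:
--             curr_d = d_scl
--             visible_asteroids.append(a)
--
--     return visible_asteroids
-- ===== SOURCE B (Python) =====
-- from math import gcd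
--
-- def visible_asteroids(asteroids, pos):
--     # One pass: for each line-of-sight direction keep the nearest asteroid,
--     # then emit them ordered by scaled direction (no sort of the full list).
--     best = {}
--     for a in asteroids:
--         if a == pos:
--             continue
--         dx, dy = a[0] - pos[0], a[1] - pos[1]
--         g = gcd(dx, dy)
--         d = (int(dx / g), int(dy / g))
--         cur = best.get(d)
--         if cur is None or g < cur[0]:
--             best[d] = (g, a)
--     return [best[d][1] for d in sorted(best)]
-- ===== Notes on version B (the rewrite author's own statement) =====
-- stated objective: faster
-- what changed: B replaces A's build-sort-dedupe over all asteroids by a single pass keeping, in a dict keyed by scaled direction, only the nearest asteroid per direction, then sorting just the distinct directions.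
import Mathlib
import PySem

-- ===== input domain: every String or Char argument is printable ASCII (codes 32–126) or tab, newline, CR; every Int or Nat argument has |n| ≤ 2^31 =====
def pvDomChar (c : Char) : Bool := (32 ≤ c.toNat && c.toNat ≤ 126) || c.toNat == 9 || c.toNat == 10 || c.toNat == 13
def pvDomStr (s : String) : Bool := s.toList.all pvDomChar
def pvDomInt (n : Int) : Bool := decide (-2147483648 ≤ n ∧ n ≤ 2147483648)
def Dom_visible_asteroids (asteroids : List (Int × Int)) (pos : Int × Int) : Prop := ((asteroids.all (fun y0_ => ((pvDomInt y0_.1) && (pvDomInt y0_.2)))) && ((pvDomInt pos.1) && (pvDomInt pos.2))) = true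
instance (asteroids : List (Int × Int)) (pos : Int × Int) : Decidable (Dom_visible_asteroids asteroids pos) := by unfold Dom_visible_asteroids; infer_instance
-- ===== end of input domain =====

-- B replaces A's build-sort-dedupe over all asteroids by one dict pass keeping the nearest
-- asteroid per scaled direction, then sorting only the distinct directions (objective: faster).


-- ===== PORT A =====
-- Python's '<' on int pairs and on ((int,int), int, (int,int)) tuples (lexicographic),
-- used by offset_data.sort()
def pairLt (p q : Int × Int) : Bool :=
  decide (p.1 < q.1) || (p.1 == q.1 && decide (p.2 < q.2))

def tripLt (x y : (Int × Int) × Int × (Int × Int)) : Bool :=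
  pairLt x.1 y.1 ||
    (x.1 == y.1 && (decide (x.2.1 < y.2.1) || (x.2.1 == y.2.1 && pairLt x.2.2 y.2.2)))

def visible_asteroids (asteroids : List (Int × Int)) (pos : Int × Int) : List (Int × Int) :=
  -- asteroids = [a for a in asteroids if a != pos]
  let asts := asteroids.filter (fun a => decide (a ≠ pos))
  -- directions = [(a[0] - pos[0], a[1] - pos[1]) for a in asteroids]
  let directions := asts.map (fun a => (a.1 - pos.1, a.2 - pos.2))
  -- offset_data loop; math.gcd is nonnegative = Int.gcd; int(d/gcd) = truncdiv (exact on the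
  -- stated |int| ≤ 2^31 domain, |d| < 2^53)
  let offset_data := (directions.zip asts).foldl
    (fun od da =>
      let d_gcd : Int := (Int.gcd da.1.1 da.1.2 : Int)
      let d_scl := (PySem.Int.truncdiv da.1.1 d_gcd, PySem.Int.truncdiv da.1.2 d_gcd)
      od ++ [(d_scl, d_gcd, da.2)]) []
  -- offset_data.sort(): stable sort, ported in PySem's sorted shape (sorted_eq_foldl_insertBy)
  -- with Python's tuple '<' as comparator (nested tuple keys have no single LT key type)
  let sortedOD := offset_data.foldl (fun acc x => PySem.List.insertBy tripLt x acc) []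
  -- final scan with curr_d = None; 'd_scl != curr_d' is 'some x.1 ≠ st.2'
  let fin := sortedOD.foldl
    (fun (st : List (Int × Int) × Option (Int × Int)) x =>
      if some x.1 ≠ st.2 then (st.1 ++ [x.2.2], some x.1) else st)
    (([] : List (Int × Int)), (none : Option (Int × Int)))
  fin.1

-- ===== PORT B =====
def visible_asteroids_alt (asteroids : List (Int × Int)) (pos : Int × Int) : List (Int × Int) :=
  let best := asteroids.foldl
    (fun (bst : PySem.Dict (Int × Int) (Int × (Int × Int))) a =>
      if a = pos then bst
      else
        let g : Int := (Int.gcd (a.1 - pos.1) (a.2 - pos.2) : Int)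
        let d := (PySem.Int.truncdiv (a.1 - pos.1) g, PySem.Int.truncdiv (a.2 - pos.2) g)
        match bst.get? d with
        | none => bst.insert d (g, a)
        | some cur => if g < cur.1 then bst.insert d (g, a) else bst)
    PySem.Dict.empty
  -- [best[d][1] for d in sorted(best)]; best[d] is total: d ranges over best's keys
  (PySem.List.sorted2 best.keys (fun k => k.1) (fun k => k.2)).map
    (fun d => (best.getD d (0, (0, 0))).2)

-- ===== PRECONDITION & SPEC =====
def Spec_visible_asteroids (asteroids : List (Int × Int)) (pos : Int × Int) (out : List (Int × Int)) : Prop := out = visible_asteroids_alt asteroids pos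
instance (asteroids : List (Int × Int)) (pos : Int × Int) (out : List (Int × Int)) : Decidable (Spec_visible_asteroids asteroids pos out) := by unfold Spec_visible_asteroids; infer_instance

-- ===== CLAIM (what is proved, stated in full; the proofs are below) =====
def Claim_equal_visible_asteroids : Prop := ∀ (asteroids : List (Int × Int)) (pos : Int × Int), Dom_visible_asteroids asteroids pos → Spec_visible_asteroids asteroids pos (visible_asteroids asteroids pos)

-- ===== LEMMAS AND PROOFS =====

-- abbreviation for the entry type of A's offset_data
abbrev Ent : Type := (Int × Int) × Int × (Int × Int)

-- the offset_data entry built from one asteroid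
def entOf (pos a : Int × Int) : Ent :=
  let g : Int := (Int.gcd (a.1 - pos.1) (a.2 - pos.2) : Int)
  ((PySem.Int.truncdiv (a.1 - pos.1) g, PySem.Int.truncdiv (a.2 - pos.2) g), g, a)

def elist (asteroids : List (Int × Int)) (pos : Int × Int) : List Ent :=
  (asteroids.filter (fun a => decide (a ≠ pos))).map (entOf pos)

def ssorted (E : List Ent) : List Ent :=
  E.foldl (fun acc x => PySem.List.insertBy tripLt x acc) []

-- the comparator sorted2 uses on (Int × Int) keys with component keys (rfl)
def kLt (a b : Int × Int) : Bool :=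
  decide (a.1 < b.1) || (!decide (b.1 < a.1) && decide (a.2 < b.2))

-- A's dedupe loop as a recursion
def dedupeRec : Option (Int × Int) → List Ent → List (Int × Int)
  | _, [] => []
  | c, x :: xs => if some x.1 ≠ c then x.2.2 :: dedupeRec (some x.1) xs else dedupeRec c xs

-- first entry of each scaled-direction group of a (sorted) list
def groups : List Ent → List Ent
  | [] => []
  | x :: xs => x :: groups (xs.filter (fun y => decide (y.1 ≠ x.1)))
termination_by l => l.length
decreasing_by simpa using Nat.lt_succ_of_le (le_trans (List.length_filter_le _ _) (by simp))

theorem groups_nil : groups [] = [] := by rw [groups]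

theorem groups_cons (x : Ent) (xs : List Ent) :
    groups (x :: xs) = x :: groups (xs.filter (fun y => decide (y.1 ≠ x.1))) := by rw [groups]

-- B's dict update step, on entries
def bstep (d : PySem.Dict (Int × Int) (Int × (Int × Int))) (x : Ent) :
    PySem.Dict (Int × Int) (Int × (Int × Int)) :=
  match d.get? x.1 with
  | none => d.insert x.1 (x.2.1, x.2.2)
  | some cur => if x.2.1 < cur.1 then d.insert x.1 (x.2.1, x.2.2) else d

def bdict (E : List Ent) : PySem.Dict (Int × Int) (Int × (Int × Int)) :=
  E.foldl bstep PySem.Dict.empty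

-- ---- generic insertion-sort lemmas ----

theorem insertBy_nil {α : Type} (before : α → α → Bool) (x : α) :
    PySem.List.insertBy before x [] = [x] := by simp [PySem.List.insertBy]

theorem insertBy_cons {α : Type} (before : α → α → Bool) (x y : α) (ys : List α) :
    PySem.List.insertBy before x (y :: ys) =
      if before x y then x :: y :: ys else y :: PySem.List.insertBy before x ys := by
  simp [PySem.List.insertBy]

theorem insertBy_perm {α : Type} (before : α → α → Bool) (x : α) (ys : List α) :
    (PySem.List.insertBy before x ys).Perm (x :: ys) := by
  induction ys with
  | nil => simp [insertBy_nil]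
  | cons y t ih =>
    rw [insertBy_cons]
    split
    · exact List.Perm.refl _
    · exact (ih.cons y).trans (List.Perm.swap x y t)

theorem foldl_insertBy_perm {α : Type} (before : α → α → Bool) (xs acc : List α) :
    (xs.foldl (fun acc x => PySem.List.insertBy before x acc) acc).Perm (acc ++ xs) := by
  induction xs generalizing acc with
  | nil => simp
  | cons x t ih =>
    simp only [List.foldl_cons]
    refine (ih _).trans ?_
    refine (((insertBy_perm before x acc).append_right t).trans ?_)
    simpa using List.perm_middle.symm

theorem insertBy_pairwise {α : Type} (before : α → α → Bool)
    (hasym : ∀ a b, before a b = true → before b a = false)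
    (htrans : ∀ a b c, before a b = true → before b c = true → before a c = true)
    (x : α) (ys : List α) (h : ys.Pairwise (fun a b => before b a = false)) :
    (PySem.List.insertBy before x ys).Pairwise (fun a b => before b a = false) := by
  induction ys with
  | nil => simp [insertBy_nil]
  | cons y t ih =>
    rw [insertBy_cons]
    rcases List.pairwise_cons.mp h with ⟨hy, ht⟩
    split
    · rename_i hxy
      refine List.Pairwise.cons ?_ h
      intro z hz
      rcases List.mem_cons.mp hz with rfl | hz'
      · exact hasym _ _ hxy
      · by_contra hzx
        have hzx' : before z x = true := by
          cases hb : before z x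
          · exact absurd hb hzx
          · rfl
        have := htrans z x y hzx' hxy
        rw [hy z hz'] at this
        exact Bool.noConfusion this
    · rename_i hxy
      refine List.Pairwise.cons ?_ (ih ht)
      intro z hz
      rcases (PySem.List.mem_insertBy _ _ _ _).mp hz with rfl | hz'
      · cases hb : before z y
        · rfl
        · exact absurd hb hxy
      · exact hy z hz'

theorem foldl_insertBy_pairwise {α : Type} (before : α → α → Bool)
    (hasym : ∀ a b, before a b = true → before b a = false)
    (htrans : ∀ a b c, before a b = true → before b c = true → before a c = true)
    (xs acc : List α) (h : acc.Pairwise (fun a b => before b a = false)) :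
    (xs.foldl (fun acc x => PySem.List.insertBy before x acc) acc).Pairwise
      (fun a b => before b a = false) := by
  induction xs generalizing acc with
  | nil => simpa
  | cons x t ih =>
    simp only [List.foldl_cons]
    exact ih _ (insertBy_pairwise before hasym htrans x acc h)

theorem sorted_unique {α : Type} (before : α → α → Bool) :
    ∀ (l₂ l₁ : List α), l₁.Perm l₂ →
    l₁.Pairwise (fun a b => before b a = false) →
    l₂.Pairwise (fun a b => before a b = true) → l₁ = l₂ := by
  intro l₂
  induction l₂ with
  | nil => intro l₁ hp _ _; exact hp.eq_nil ▸ rfl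
  | cons y t ih =>
    intro l₁ hp h₁ h₂
    cases l₁ with
    | nil => exact absurd hp.symm (by simp)
    | cons x t₁ =>
      rcases List.pairwise_cons.mp h₁ with ⟨hx1, ht1⟩
      rcases List.pairwise_cons.mp h₂ with ⟨hy2, ht2⟩
      have hxy : x = y := by
        by_contra hne
        have hx2 : x ∈ y :: t := hp.mem_iff.mp (List.mem_cons_self)
        have hxt : x ∈ t := by
          rcases List.mem_cons.mp hx2 with rfl | h
          · exact absurd rfl hne
          · exact h
        have hyx : before y x = true := hy2 x hxt
        have hy1 : y ∈ x :: t₁ := hp.symm.mem_iff.mp (List.mem_cons_self)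
        have hyt : y ∈ t₁ := by
          rcases List.mem_cons.mp hy1 with rfl | h
          · exact absurd rfl (Ne.symm hne)
          · exact h
        rw [hx1 y hyt] at hyx
        exact Bool.noConfusion hyx
      subst hxy
      have := ih t₁ hp.cons_inv ht1 ht2
      rw [this]

-- ---- comparator facts ----

theorem tripLt_asym (a b : Ent) : tripLt a b = true → tripLt b a = false := by
  rcases a with ⟨⟨a1, a2⟩, g, ⟨x1, x2⟩⟩
  rcases b with ⟨⟨b1, b2⟩, h, ⟨y1, y2⟩⟩
  simp [tripLt, pairLt, Prod.ext_iff]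
  omega

theorem tripLt_trans (a b c : Ent) :
    tripLt a b = true → tripLt b c = true → tripLt a c = true := by
  rcases a with ⟨⟨a1, a2⟩, g, ⟨x1, x2⟩⟩
  rcases b with ⟨⟨b1, b2⟩, h, ⟨y1, y2⟩⟩
  rcases c with ⟨⟨c1, c2⟩, i, ⟨z1, z2⟩⟩
  simp [tripLt, pairLt, Prod.ext_iff]
  omega

theorem tripLt_irrefl (a : Ent) : tripLt a a = false := by
  rcases a with ⟨⟨a1, a2⟩, g, ⟨x1, x2⟩⟩
  simp [tripLt, pairLt]

theorem kLt_asym (a b : Int × Int) : kLt a b = true → kLt b a = false := by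
  rcases a with ⟨a1, a2⟩; rcases b with ⟨b1, b2⟩
  simp [kLt, decide_eq_true_eq]
  omega

theorem kLt_trans (a b c : Int × Int) :
    kLt a b = true → kLt b c = true → kLt a c = true := by
  rcases a with ⟨a1, a2⟩; rcases b with ⟨b1, b2⟩; rcases c with ⟨c1, c2⟩
  simp [kLt, decide_eq_true_eq]
  omega

theorem kLt_ne (a b : Int × Int) : kLt a b = true → a ≠ b := by
  rcases a with ⟨a1, a2⟩; rcases b with ⟨b1, b2⟩
  simp [kLt, Prod.ext_iff, decide_eq_true_eq]
  omega

-- keys of a tripLE pair are pairLE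
theorem keyLE_of_tripLE (x y : Ent) (h : tripLt y x = false) : pairLt y.1 x.1 = false := by
  rcases x with ⟨⟨a1, a2⟩, g, ⟨x1, x2⟩⟩
  rcases y with ⟨⟨b1, b2⟩, h', ⟨y1, y2⟩⟩
  simp [tripLt, pairLt, Prod.ext_iff] at *
  omega

theorem pairLE_antisymm (a b : Int × Int) (h1 : pairLt a b = false) (h2 : pairLt b a = false) :
    a = b := by
  rcases a with ⟨a1, a2⟩; rcases b with ⟨b1, b2⟩
  simp [pairLt, Prod.ext_iff] at *
  omega

theorem kLt_of_pairLE_ne (a b : Int × Int) (h : pairLt a b = false) (hne : a ≠ b) :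
    kLt b a = true := by
  rcases a with ⟨a1, a2⟩; rcases b with ⟨b1, b2⟩
  simp [pairLt, kLt, Prod.ext_iff, decide_eq_true_eq] at *
  omega

theorem gLE_of_tripLE_same_key (x y : Ent) (h : tripLt y x = false) (hk : y.1 = x.1) :
    x.2.1 ≤ y.2.1 := by
  rcases x with ⟨⟨a1, a2⟩, g, ⟨x1, x2⟩⟩
  rcases y with ⟨⟨b1, b2⟩, h', ⟨y1, y2⟩⟩
  simp [tripLt, pairLt, Prod.ext_iff] at *
  omega

-- ---- entry facts ----

theorem entOf_recon (pos a : Int × Int) :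
    (entOf pos a).2.1 * (entOf pos a).1.1 = a.1 - pos.1 ∧
    (entOf pos a).2.1 * (entOf pos a).1.2 = a.2 - pos.2 := by
  constructor
  · exact Int.mul_tdiv_cancel' (Int.gcd_dvd_left _ _)
  · exact Int.mul_tdiv_cancel' (Int.gcd_dvd_right _ _)

theorem entOf_det (pos a b : Int × Int) (hk : (entOf pos a).1 = (entOf pos b).1)
    (hg : (entOf pos a).2.1 = (entOf pos b).2.1) : a = b := by
  rcases entOf_recon pos a with ⟨ha1, ha2⟩
  rcases entOf_recon pos b with ⟨hb1, hb2⟩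
  have h1 : (entOf pos a).1.1 = (entOf pos b).1.1 := by rw [hk]
  have h2 : (entOf pos a).1.2 = (entOf pos b).1.2 := by rw [hk]
  have e1 : a.1 - pos.1 = b.1 - pos.1 := by rw [← ha1, ← hb1, hg, h1]
  have e2 : a.2 - pos.2 = b.2 - pos.2 := by rw [← ha2, ← hb2, hg, h2]
  exact Prod.ext (by omega) (by omega)

-- determinism among elist entries
theorem elist_det (asteroids : List (Int × Int)) (pos : Int × Int) :
    ∀ x ∈ elist asteroids pos, ∀ y ∈ elist asteroids pos,
      x.1 = y.1 → x.2.1 = y.2.1 → x = y := by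
  intro x hx y hy hk hg
  rcases List.mem_map.mp hx with ⟨a, _, rfl⟩
  rcases List.mem_map.mp hy with ⟨b, _, rfl⟩
  rw [entOf_det pos a b hk hg]

-- ---- A-side: dedupe characterization ----

theorem foldl_dedupe (S : List Ent) : ∀ (vis : List (Int × Int)) (c : Option (Int × Int)),
    (S.foldl
      (fun (st : List (Int × Int) × Option (Int × Int)) x =>
        if some x.1 ≠ st.2 then (st.1 ++ [x.2.2], some x.1) else st)
      (vis, c)).1 = vis ++ dedupeRec c S := by
  induction S with
  | nil => intro vis c; simp [dedupeRec]
  | cons x t ih =>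
    intro vis c
    simp only [List.foldl_cons, dedupeRec]
    by_cases h : some x.1 ≠ c
    · rw [if_pos h, if_pos h, ih]
      simp
    · rw [if_neg h, if_neg h, ih]

theorem dedupe_skip (k : Int × Int) :
    ∀ (l : List Ent), l.Pairwise (fun a b => tripLt b a = false) →
    (∀ y ∈ l, pairLt y.1 k = false) →
    dedupeRec (some k) l = dedupeRec none (l.filter (fun y => decide (y.1 ≠ k))) := by
  intro l
  induction l with
  | nil => intro _ _; simp [dedupeRec]
  | cons y ys ih =>
    intro hp hmin
    rcases List.pairwise_cons.mp hp with ⟨hy, hys⟩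
    by_cases hk : y.1 = k
    · have : ¬ (some y.1 ≠ some k) := by simp [hk]
      rw [dedupeRec, if_neg this]
      have hf : (y :: ys).filter (fun y => decide (y.1 ≠ k)) =
          ys.filter (fun y => decide (y.1 ≠ k)) := by
        simp [hk]
      rw [hf]
      exact ih hys (fun z hz => hmin z (List.mem_cons_of_mem y hz))
    · have hcond : some y.1 ≠ some k := by simpa using hk
      rw [dedupeRec, if_pos hcond]
      have hf : (y :: ys).filter (fun y => decide (y.1 ≠ k)) =
          y :: ys.filter (fun y => decide (y.1 ≠ k)) := by
        simp [hk]
      have hnoop : ys.filter (fun y => decide (y.1 ≠ k)) = ys := by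
        apply List.filter_eq_self.mpr
        intro z hz
        simp only [decide_eq_true_eq]
        intro hzk
        have h1 : pairLt z.1 y.1 = false := keyLE_of_tripLE y z (hy z hz)
        have h2 : pairLt y.1 k = false := hmin y List.mem_cons_self
        rw [hzk] at h1
        exact hk (pairLE_antisymm _ _ h2 h1)
      rw [hf, hnoop]
      simp [dedupeRec]

theorem mem_of_mem_groups : ∀ (S : List Ent), ∀ x ∈ groups S, x ∈ S := by
  have H : ∀ (n : Nat) (S : List Ent), S.length ≤ n → ∀ x ∈ groups S, x ∈ S := by
    intro n
    induction n with
    | zero =>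
      intro S hS x hx
      rw [List.length_eq_zero_iff.mp (Nat.le_zero.mp hS)] at hx ⊢
      rw [groups_nil] at hx
      exact hx
    | succ n ih =>
      intro S hS x hx
      cases S with
      | nil => rw [groups_nil] at hx; exact hx
      | cons z xs =>
        rw [groups_cons] at hx
        have hxs : xs.length ≤ n := by simp at hS; omega
        rcases List.mem_cons.mp hx with rfl | hx'
        · exact List.mem_cons_self
        · have hlen : (xs.filter (fun y => decide (y.1 ≠ z.1))).length ≤ n :=
            le_trans (List.length_filter_le _ _) hxs
          exact List.mem_cons_of_mem z (List.mem_of_mem_filter (ih _ hlen x hx'))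
  exact fun S => H S.length S le_rfl

theorem keys_groups_complete : ∀ (S : List Ent), ∀ y ∈ S, ∃ x ∈ groups S, x.1 = y.1 := by
  have H : ∀ (n : Nat) (S : List Ent), S.length ≤ n → ∀ y ∈ S, ∃ x ∈ groups S, x.1 = y.1 := by
    intro n
    induction n with
    | zero =>
      intro S hS y hy
      rw [List.length_eq_zero_iff.mp (Nat.le_zero.mp hS)] at hy
      exact absurd hy (List.not_mem_nil)
    | succ n ih =>
      intro S hS y hy
      cases S with
      | nil => exact absurd hy (List.not_mem_nil)
      | cons z xs =>
        have hxs : xs.length ≤ n := by simp at hS; omega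
        rcases List.mem_cons.mp hy with rfl | hy'
        · exact ⟨y, by rw [groups_cons]; exact List.mem_cons_self, rfl⟩
        · by_cases hk : y.1 = z.1
          · exact ⟨z, by rw [groups_cons]; exact List.mem_cons_self, hk.symm ▸ rfl⟩
          · have hyf : y ∈ xs.filter (fun y => decide (y.1 ≠ z.1)) :=
              List.mem_filter.mpr ⟨hy', by simpa using hk⟩
            have hlen : (xs.filter (fun y => decide (y.1 ≠ z.1))).length ≤ n :=
              le_trans (List.length_filter_le _ _) hxs
            rcases ih _ hlen y hyf with ⟨x, hx, hxy⟩
            exact ⟨x, by rw [groups_cons]; exact List.mem_cons_of_mem z hx, hxy⟩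
  exact fun S => H S.length S le_rfl

theorem keys_groups_strict : ∀ (S : List Ent), S.Pairwise (fun a b => tripLt b a = false) →
    ((groups S).map (fun x => x.1)).Pairwise (fun k k' => kLt k k' = true) := by
  have H : ∀ (n : Nat) (S : List Ent), S.length ≤ n →
      S.Pairwise (fun a b => tripLt b a = false) →
      ((groups S).map (fun x => x.1)).Pairwise (fun k k' => kLt k k' = true) := by
    intro n
    induction n with
    | zero =>
      intro S hS _
      rw [List.length_eq_zero_iff.mp (Nat.le_zero.mp hS), groups_nil]
      exact List.Pairwise.nil
    | succ n ih =>
      intro S hS hp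
      cases S with
      | nil => rw [groups_nil]; exact List.Pairwise.nil
      | cons z xs =>
        have hxs : xs.length ≤ n := by simp at hS; omega
        rcases List.pairwise_cons.mp hp with ⟨hz, hxsp⟩
        rw [groups_cons]
        simp only [List.map_cons]
        have hlen : (xs.filter (fun y => decide (y.1 ≠ z.1))).length ≤ n :=
          le_trans (List.length_filter_le _ _) hxs
        refine List.Pairwise.cons ?_ (ih _ hlen (hxsp.filter _))
        intro k hk
        rcases List.mem_map.mp hk with ⟨x, hx, rfl⟩
        have hxf := mem_of_mem_groups _ x hx
        have hxm : x ∈ xs := List.mem_of_mem_filter hxf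
        have hne : x.1 ≠ z.1 := by
          have := (List.mem_filter.mp hxf).2
          simpa using this
        exact kLt_of_pairLE_ne x.1 z.1 (keyLE_of_tripLE z x (hz x hxm)) hne
  exact fun S => H S.length S le_rfl

theorem groups_min : ∀ (S : List Ent), S.Pairwise (fun a b => tripLt b a = false) →
    ∀ x ∈ groups S, ∀ y ∈ S, y.1 = x.1 → tripLt y x = false := by
  have H : ∀ (n : Nat) (S : List Ent), S.length ≤ n →
      S.Pairwise (fun a b => tripLt b a = false) →
      ∀ x ∈ groups S, ∀ y ∈ S, y.1 = x.1 → tripLt y x = false := by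
    intro n
    induction n with
    | zero =>
      intro S hS _ x hx
      rw [List.length_eq_zero_iff.mp (Nat.le_zero.mp hS), groups_nil] at hx
      exact absurd hx (List.not_mem_nil)
    | succ n ih =>
      intro S hS hp x hx y hy hk
      cases S with
      | nil => exact absurd hy (List.not_mem_nil)
      | cons z xs =>
        have hxs : xs.length ≤ n := by simp at hS; omega
        rcases List.pairwise_cons.mp hp with ⟨hz, hxsp⟩
        rw [groups_cons] at hx
        have hlen : (xs.filter (fun y => decide (y.1 ≠ z.1))).length ≤ n :=
          le_trans (List.length_filter_le _ _) hxs
        rcases List.mem_cons.mp hx with hxz | hx'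
        · rcases List.mem_cons.mp hy with hyz | hy'
          · rw [hyz, hxz]; exact tripLt_irrefl z
          · rw [hxz]; exact hz y hy'
        · have hxf := mem_of_mem_groups _ x hx'
          have hxne : x.1 ≠ z.1 := by
            have := (List.mem_filter.mp hxf).2
            simpa using this
          rcases List.mem_cons.mp hy with hyz | hy'
          · rw [hyz] at hk; exact absurd hk.symm hxne
          · have hyf : y ∈ xs.filter (fun y => decide (y.1 ≠ z.1)) :=
              List.mem_filter.mpr ⟨hy', by
                simp only [decide_eq_true_eq]
                rw [hk]
                exact hxne⟩
            exact ih _ hlen (hxsp.filter _) x hx' y hyf hk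
  exact fun S => H S.length S le_rfl

theorem A_main : ∀ (S : List Ent), S.Pairwise (fun a b => tripLt b a = false) →
    dedupeRec none S = (groups S).map (fun x => x.2.2) := by
  have H : ∀ (n : Nat) (S : List Ent), S.length ≤ n →
      S.Pairwise (fun a b => tripLt b a = false) →
      dedupeRec none S = (groups S).map (fun x => x.2.2) := by
    intro n
    induction n with
    | zero =>
      intro S hS _
      rw [List.length_eq_zero_iff.mp (Nat.le_zero.mp hS), groups_nil]
      rfl
    | succ n ih =>
      intro S hS hp
      cases S with
      | nil => rw [groups_nil]; rfl
      | cons x xs =>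
        have hxs : xs.length ≤ n := by simp at hS; omega
        rcases List.pairwise_cons.mp hp with ⟨hx, hxsp⟩
        rw [groups_cons]
        simp only [List.map_cons]
        rw [dedupeRec, if_pos (by simp)]
        rw [dedupe_skip x.1 xs hxsp (fun y hy => keyLE_of_tripLE x y (hx y hy))]
        have hlen : (xs.filter (fun y => decide (y.1 ≠ x.1))).length ≤ n :=
          le_trans (List.length_filter_le _ _) hxs
        rw [ih _ hlen (hxsp.filter _)]
  exact fun S => H S.length S le_rfl

-- ---- B-side: dict invariant ----

def DInv (M : List Ent) (d : PySem.Dict (Int × Int) (Int × (Int × Int))) : Prop :=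
  d.keys.Nodup ∧
  ∀ k : Int × Int,
    (∀ v, d.get? k = some v → (k, v.1, v.2) ∈ M ∧ ∀ x ∈ M, x.1 = k → v.1 ≤ x.2.1) ∧
    (d.get? k = none → ∀ x ∈ M, x.1 ≠ k)

theorem bstep_none (d : PySem.Dict (Int × Int) (Int × (Int × Int))) (e : Ent)
    (h : d.get? e.1 = none) : bstep d e = d.insert e.1 (e.2.1, e.2.2) := by
  unfold bstep; rw [h]

theorem bstep_some_lt (d : PySem.Dict (Int × Int) (Int × (Int × Int))) (e : Ent)
    (cur : Int × (Int × Int)) (h : d.get? e.1 = some cur) (hlt : e.2.1 < cur.1) :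
    bstep d e = d.insert e.1 (e.2.1, e.2.2) := by
  unfold bstep; rw [h]; exact if_pos hlt

theorem bstep_some_ge (d : PySem.Dict (Int × Int) (Int × (Int × Int))) (e : Ent)
    (cur : Int × (Int × Int)) (h : d.get? e.1 = some cur) (hge : ¬ e.2.1 < cur.1) :
    bstep d e = d := by
  unfold bstep; rw [h]; exact if_neg hge

-- the invariant survives one insert of e's (key, value)
theorem DInv_insert_aux (M : List Ent) (d : PySem.Dict (Int × Int) (Int × (Int × Int))) (e : Ent)
    (hnd : d.keys.Nodup)
    (hinv : ∀ k : Int × Int,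
      (∀ v, d.get? k = some v → (k, v.1, v.2) ∈ M ∧ ∀ x ∈ M, x.1 = k → v.1 ≤ x.2.1) ∧
      (d.get? k = none → ∀ x ∈ M, x.1 ≠ k))
    (hmin : ∀ x ∈ M, x.1 = e.1 → e.2.1 ≤ x.2.1) :
    DInv (M ++ [e]) (d.insert e.1 (e.2.1, e.2.2)) := by
  refine ⟨PySem.Dict.nodup_keys_insert _ _ _ hnd, ?_⟩
  intro k
  rw [PySem.Dict.get?_insert]
  by_cases hk : k = e.1
  · rw [if_pos hk]
    constructor
    · rintro v hv
      injection hv with hv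
      subst hv
      constructor
      · rw [hk]; simp
      · intro x hx hxk
        rcases List.mem_append.mp hx with hx' | hx'
        · exact hmin x hx' (by rw [← hk]; exact hxk)
        · simp at hx'; subst hx'; exact le_refl _
    · intro hcon; exact absurd hcon (by simp)
  · rw [if_neg hk]
    constructor
    · intro v hv
      rcases (hinv k).1 v hv with ⟨hm, hmin'⟩
      refine ⟨List.mem_append_left _ hm, ?_⟩
      intro x hx hxk
      rcases List.mem_append.mp hx with hx' | hx'
      · exact hmin' x hx' hxk
      · simp at hx'; subst hx'; exact absurd hxk (fun h' => hk h'.symm)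
    · intro hn x hx
      rcases List.mem_append.mp hx with hx' | hx'
      · exact (hinv k).2 hn x hx'
      · simp at hx'; subst hx'; exact fun h' => hk h'.symm

theorem DInv_step (M : List Ent) (d : PySem.Dict (Int × Int) (Int × (Int × Int))) (e : Ent)
    (h : DInv M d) : DInv (M ++ [e]) (bstep d e) := by
  rcases h with ⟨hnd, hinv⟩
  rcases hc : d.get? e.1 with _ | cur
  · rw [bstep_none d e hc]
    exact DInv_insert_aux M d e hnd hinv
      (fun x hx hxk => absurd hxk ((hinv e.1).2 hc x hx))
  · by_cases hlt : e.2.1 < cur.1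
    · rw [bstep_some_lt d e cur hc hlt]
      refine DInv_insert_aux M d e hnd hinv ?_
      intro x hx hxk
      have := ((hinv e.1).1 cur hc).2 x hx hxk
      omega
    · rw [bstep_some_ge d e cur hc hlt]
      refine ⟨hnd, ?_⟩
      intro k
      constructor
      · intro v hv
        rcases (hinv k).1 v hv with ⟨hm, hmin⟩
        refine ⟨List.mem_append_left _ hm, ?_⟩
        intro x hx hxk
        rcases List.mem_append.mp hx with hx' | hx'
        · exact hmin x hx' hxk
        · simp at hx'
          rw [hx'] at hxk ⊢
          by_cases he : k = e.1
          · rw [he] at hv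
            rw [hc] at hv
            injection hv with hv
            subst hv
            omega
          · exact absurd hxk (fun h' => he h'.symm)
      · intro hn x hx
        rcases List.mem_append.mp hx with hx' | hx'
        · exact (hinv k).2 hn x hx'
        · simp at hx'
          rw [hx']
          intro h'
          rw [← h'] at hn
          rw [hn] at hc
          exact absurd hc (by simp)

theorem DInv_foldl : ∀ (M₂ : List Ent) (d : PySem.Dict (Int × Int) (Int × (Int × Int)))
    (M₁ : List Ent), DInv M₁ d → DInv (M₁ ++ M₂) (M₂.foldl bstep d) := by
  intro M₂
  induction M₂ with
  | nil => intro d M₁ h; simpa using h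
  | cons x t ih =>
    intro d M₁ h
    simp only [List.foldl_cons]
    have := ih (bstep d x) (M₁ ++ [x]) (DInv_step M₁ d x h)
    simpa using this

theorem DInv_bdict (E : List Ent) : DInv E (bdict E) := by
  have := DInv_foldl E PySem.Dict.empty [] ?_
  · simpa [bdict] using this
  · refine ⟨PySem.Dict.nodup_keys_empty, ?_⟩
    intro k
    constructor
    · intro v hv; simp [PySem.Dict.get?_empty] at hv
    · intro _ x hx; simp at hx

-- ---- normalizing the two ports ----

theorem zip_map_self {α β : Type} (f : α → β) : ∀ (l : List α),
    (l.map f).zip l = l.map (fun a => (f a, a)) := by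
  intro l
  induction l with
  | nil => rfl
  | cons x t ih => simp [ih]

theorem A_eq (asteroids : List (Int × Int)) (pos : Int × Int) :
    visible_asteroids asteroids pos = dedupeRec none (ssorted (elist asteroids pos)) := by
  simp only [visible_asteroids]
  rw [zip_map_self]
  rw [foldl_dedupe]
  simp only [List.nil_append]
  congr 1
  unfold ssorted elist
  congr 1
  rw [PySem.List.foldl_append_singleton_eq_map, List.nil_append, List.map_map]
  rfl

theorem B_eq (asteroids : List (Int × Int)) (pos : Int × Int) :
    visible_asteroids_alt asteroids pos =
      (PySem.List.sorted2 (bdict (elist asteroids pos)).keys (fun k => k.1) (fun k => k.2)).map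
        (fun d => ((bdict (elist asteroids pos)).getD d (0, (0, 0))).2) := by
  have hstep : (fun (bst : PySem.Dict (Int × Int) (Int × (Int × Int))) (a : Int × Int) =>
      if a = pos then bst
      else
        let g : Int := (Int.gcd (a.1 - pos.1) (a.2 - pos.2) : Int)
        let d := (PySem.Int.truncdiv (a.1 - pos.1) g, PySem.Int.truncdiv (a.2 - pos.2) g)
        match bst.get? d with
        | none => bst.insert d (g, a)
        | some cur => if g < cur.1 then bst.insert d (g, a) else bst) =
      (fun (bst : PySem.Dict (Int × Int) (Int × (Int × Int))) (a : Int × Int) =>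
        if decide (a ≠ pos) = true then bstep bst (entOf pos a) else bst) := by
    funext bst a
    by_cases h : a = pos
    · simp [h]
    · simp only [h, decide_not, Bool.not_eq_true']
      rfl
  simp only [visible_asteroids_alt]
  rw [hstep]
  unfold bdict elist
  rw [List.foldl_map, List.foldl_filter]

-- sorted2 with component keys is the insertBy-fold with kLt (definitional)
theorem sorted2_eq_foldl (xs : List (Int × Int)) :
    PySem.List.sorted2 xs (fun k => k.1) (fun k => k.2) =
      xs.foldl (fun acc x => PySem.List.insertBy kLt x acc) [] := rfl

-- ---- the main bridge ----

theorem main_bridge (asteroids : List (Int × Int)) (pos : Int × Int) :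
    visible_asteroids asteroids pos = visible_asteroids_alt asteroids pos := by
  set E := elist asteroids pos with hE
  set S := ssorted E with hS
  have hperm : S.Perm E := by
    have := foldl_insertBy_perm tripLt E []
    simpa [ssorted] using this
  have hpair : S.Pairwise (fun a b => tripLt b a = false) :=
    foldl_insertBy_pairwise tripLt tripLt_asym tripLt_trans E [] (List.Pairwise.nil)
  rcases DInv_bdict E with ⟨hnd, hinv⟩
  -- the sorted key list equals the groups key list
  have hkeys : PySem.List.sorted2 (bdict E).keys (fun k => k.1) (fun k => k.2) =
      (groups S).map (fun x => x.1) := by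
    rw [sorted2_eq_foldl]
    apply sorted_unique kLt
    · -- Perm
      refine (foldl_insertBy_perm kLt (bdict E).keys []).trans ?_
      simp only [List.nil_append]
      rw [List.perm_ext_iff_of_nodup hnd]
      · intro k
        constructor
        · intro hk
          rcases hgk : (bdict E).get? k with _ | v
          · exact absurd hk ((PySem.Dict.get?_eq_none_iff_not_mem_keys _ _).mp hgk)
          · rcases (hinv k).1 v hgk with ⟨hm, _⟩
            have hmS : (k, v.1, v.2) ∈ S := hperm.mem_iff.mpr hm
            rcases keys_groups_complete S _ hmS with ⟨x, hx, hxk⟩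
            exact List.mem_map.mpr ⟨x, hx, hxk⟩
        · intro hk
          rcases List.mem_map.mp hk with ⟨x, hx, rfl⟩
          have hxS : x ∈ S := mem_of_mem_groups S x hx
          have hxE : x ∈ E := hperm.mem_iff.mp hxS
          by_contra hnk
          have hn : (bdict E).get? x.1 = none :=
            (PySem.Dict.get?_eq_none_iff_not_mem_keys _ _).mpr hnk
          exact (hinv x.1).2 hn x hxE rfl
      · exact (keys_groups_strict S hpair).imp (fun h => kLt_ne _ _ h)
    · exact foldl_insertBy_pairwise kLt kLt_asym kLt_trans _ [] List.Pairwise.nil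
    · exact keys_groups_strict S hpair
  -- pointwise: the dict stores exactly the groups entries
  have hpoint : ∀ x ∈ groups S, (bdict E).getD x.1 (0, (0, 0)) = (x.2.1, x.2.2) := by
    intro x hx
    have hxS : x ∈ S := mem_of_mem_groups S x hx
    have hxE : x ∈ E := hperm.mem_iff.mp hxS
    rcases hgk : (bdict E).get? x.1 with _ | v
    · exact absurd rfl ((hinv x.1).2 hgk x hxE)
    · rcases (hinv x.1).1 v hgk with ⟨hm, hmin⟩
      have hvE : ((x.1, v.1, v.2) : Ent) ∈ E := hm
      have hvS : ((x.1, v.1, v.2) : Ent) ∈ S := hperm.mem_iff.mpr hvE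
      have h1 : v.1 ≤ x.2.1 := hmin x hxE rfl
      have h2 : x.2.1 ≤ v.1 := by
        have := groups_min S hpair x hx (x.1, v.1, v.2) hvS rfl
        exact gLE_of_tripLE_same_key x (x.1, v.1, v.2) this rfl
      have hgeq : v.1 = x.2.1 := le_antisymm h1 h2
      have heq : ((x.1, v.1, v.2) : Ent) = x := by
        apply elist_det asteroids pos _ hvE x hxE rfl
        simpa using hgeq
      have hv2 : v.2 = x.2.2 := by
        have := congrArg (fun z : Ent => z.2.2) heq
        simpa using this
      rw [PySem.Dict.getD_eq_get?_getD, hgk]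
      simp [← hgeq, ← hv2]
  rw [A_eq, B_eq, ← hE, hkeys, A_main S hpair, List.map_map]
  apply List.map_congr_left
  intro x hx
  simp only [Function.comp_apply]
  rw [hpoint x hx]

-- ===== VERDICT (by name: the statement is the Claim_ definition above) =====
theorem visible_asteroids_spec : Claim_equal_visible_asteroids := by
  intro asteroids pos _
  unfold Spec_visible_asteroids
  exact main_bridge asteroids pos
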